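-- pv_equiv track=rewrite | github.com/irc-hslu/hslu-quality-survey | quality-experiment.py | balanced_latin_square
-- ===== SOURCE A (Python) =====
-- def balanced_latin_square(array, participant_id):
--     """
--     Generate a balanced Latin square sequence for video randomization.
--     Args:
--         array: List of indices (0 to n-1)
--         participant_id: Participant ID as integer
--
--     Returns:
--         List of indices in balanced Latin square order
--     """
--     result = []
--     j = 0
--     h = 0
--     for i in range(len(array)):
--         val = 0
--         if i < 2 or i % 2 != 0:
--             val = j
--             j += 1
--         else:
--             val = len(array) - h - 1
--             h += 1
--
--         idx = (val + participant_id) % len(array)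
--         result.append(array[idx])
--
--     if len(array) % 2 != 0 and participant_id % 2 != 0:
--         result = result[::-1]  # Reverse the list
--     return result
-- ===== SOURCE B (Python) =====
-- def balanced_latin_square(array, participant_id):
--     n = len(array)
--     vals = [0] if n else []
--     lo, hi = 1, n - 1
--     while lo < hi:
--         vals.append(lo)
--         vals.append(hi)
--         lo += 1
--         hi -= 1
--     if lo == hi:
--         vals.append(lo)
--     result = [array[(v + participant_id) % n] for v in vals]
--     if n % 2 != 0 and participant_id % 2 != 0:
--         result.reverse()
--     return result
-- ===== Notes on version B (the rewrite author's own statement) =====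
-- stated objective: alternative
-- what changed: Builds the value sequence by a two-pointer interleave converging from both ends of the range (0, then lo/hi pairs), instead of A's single indexed loop with parity branching on i and running counters j and h.
import Mathlib
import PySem

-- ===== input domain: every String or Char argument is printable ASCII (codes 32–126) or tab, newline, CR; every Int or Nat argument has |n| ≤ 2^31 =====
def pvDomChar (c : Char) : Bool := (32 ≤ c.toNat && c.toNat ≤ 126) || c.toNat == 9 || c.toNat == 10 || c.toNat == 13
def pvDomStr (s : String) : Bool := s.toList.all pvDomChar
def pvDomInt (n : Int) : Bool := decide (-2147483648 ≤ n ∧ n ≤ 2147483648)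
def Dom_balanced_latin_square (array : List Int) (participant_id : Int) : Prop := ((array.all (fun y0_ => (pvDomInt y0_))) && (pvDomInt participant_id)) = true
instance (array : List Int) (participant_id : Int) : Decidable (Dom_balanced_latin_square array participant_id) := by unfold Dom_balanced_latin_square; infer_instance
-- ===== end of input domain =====

-- B builds the value sequence by a two-pointer interleave from both ends instead of A's indexed loop with counters j/h (alternative decomposition, same cost).

-- ===== PORT A =====
-- one loop iteration: state (result, j, h); indices guaranteed in range, so getD 0 is exact
def blsStep (n : Nat) (array : List Int) (pid : Int)
    (st : List Int × Int × Int) (i : Nat) : List Int × Int × Int :=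
  match st with
  | (result, j, h) =>
    if i < 2 ∨ i % 2 ≠ 0 then
      let val : Int := j
      let idx := PySem.Int.mod (val + pid) (n : Int)
      (result ++ [(PySem.List.pyGet? array idx).getD 0], j + 1, h)
    else
      let val : Int := (n : Int) - h - 1
      let idx := PySem.Int.mod (val + pid) (n : Int)
      (result ++ [(PySem.List.pyGet? array idx).getD 0], j, h + 1)

def balanced_latin_square (array : List Int) (participant_id : Int) : List Int :=
  let n := array.length
  let st := (List.range n).foldl (blsStep n array participant_id) ([], 0, 0)
  if n % 2 ≠ 0 ∧ PySem.Int.mod participant_id 2 ≠ 0 then st.1.reverse else st.1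

-- ===== PORT B =====
-- the two-pointer while loop of Source B: append lo then hi, move both pointers inward
def blsVals (lo hi : Nat) : List Int :=
  if _h : lo < hi then (lo : Int) :: (hi : Int) :: blsVals (lo + 1) (hi - 1)
  else if lo = hi then [(lo : Int)] else []
termination_by hi - lo
decreasing_by omega

def balanced_latin_square_alt (array : List Int) (participant_id : Int) : List Int :=
  let n := array.length
  let vals : List Int := if n = 0 then [] else (0 : Int) :: blsVals 1 (n - 1)
  let result := vals.map
    (fun v => (PySem.List.pyGet? array (PySem.Int.mod (v + participant_id) (n : Int))).getD 0)
  if n % 2 ≠ 0 ∧ PySem.Int.mod participant_id 2 ≠ 0 then result.reverse else result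

-- ===== PRECONDITION & SPEC =====
def Spec_balanced_latin_square (array : List Int) (participant_id : Int) (out : List Int) : Prop := out = balanced_latin_square_alt array participant_id
instance (array : List Int) (participant_id : Int) (out : List Int) : Decidable (Spec_balanced_latin_square array participant_id out) := by unfold Spec_balanced_latin_square; infer_instance

-- ===== CLAIM (what is proved, stated in full; the proofs are below) =====
def Claim_equal_balanced_latin_square : Prop := ∀ (array : List Int) (participant_id : Int), Dom_balanced_latin_square array participant_id → Spec_balanced_latin_square array participant_id (balanced_latin_square array participant_id)

-- ===== LEMMAS AND PROOFS =====

-- closed form of the val A computes at position i (proof-only characterisation)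
def blsVal (n i : Nat) : Int :=
  if i < 2 then (i : Int)
  else if i % 2 ≠ 0 then (((i + 1) / 2 : Nat) : Int)
  else (n : Int) - ((i / 2 : Nat) : Int)

-- the value of A's counter j before processing index i
def blsJ (i : Nat) : Int := if i < 2 then (i : Int) else (((i + 2) / 2 : Nat) : Int)

-- loop invariant: folding A's step over range' i m from state (res, blsJ i, i - blsJ i)
-- appends exactly the closed-form elements
lemma bls_fold_inv (n : Nat) (array : List Int) (pid : Int) :
    ∀ (m i : Nat) (res : List Int),
      ((List.range' i m).foldl (blsStep n array pid) (res, blsJ i, (i : Int) - blsJ i)).1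
      = res ++ (List.range' i m).map
          (fun k => (PySem.List.pyGet? array (PySem.Int.mod (blsVal n k + pid) (n : Int))).getD 0) := by
  intro m
  induction m with
  | zero => intro i res; simp [List.range']
  | succ m ih =>
    intro i res
    rw [List.range'_succ]
    by_cases hb : i < 2 ∨ i % 2 ≠ 0
    · have hv : blsJ i = blsVal n i := by
        simp only [blsJ, blsVal]
        rcases hb with h2 | hodd
        · simp [h2]
        · split_ifs <;> push_cast <;> omega
      have hj : blsVal n i + 1 = blsJ (i + 1) := by
        rw [← hv]; simp only [blsJ]; split_ifs <;> push_cast <;> omega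
      have hh : (i : Int) - blsVal n i = ((i + 1 : Nat) : Int) - blsJ (i + 1) := by
        rw [← hv, ← hj, ← hv]; push_cast; ring
      simp only [List.foldl_cons, blsStep, if_pos hb, hv]
      rw [hj, hh, ih]
      simp
    · have hj : blsJ i = blsJ (i + 1) := by
        simp only [blsJ]; split_ifs <;> push_cast <;> omega
      have hv : (n : Nat) - ((i : Int) - blsJ i) - 1 = blsVal n i := by
        simp only [blsJ, blsVal]; split_ifs <;> push_cast <;> omega
      have hh : ((i : Int) - blsJ i) + 1 = ((i + 1 : Nat) : Int) - blsJ (i + 1) := by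
        rw [← hj]; push_cast; ring
      simp only [List.foldl_cons, blsStep, if_neg hb, hv]
      rw [hh, hj, ih]
      simp

-- the two-pointer list equals the closed-form vals over the remaining odd/even index pairs
lemma bls_two_ptr (n : Nat) :
    ∀ m lo, 1 ≤ lo → m + 2 * lo = n + 1 →
      (List.range' (2 * lo - 1) m).map (blsVal n) = blsVals lo (n - lo) := by
  intro m
  induction m using Nat.strong_induction_on with
  | _ m ih =>
    intro lo hlo hm
    rcases m with _ | _ | m
    · rw [blsVals]
      have h1 : ¬ lo < n - lo := by omega
      have h2 : ¬ lo = n - lo := by omega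
      simp [h1, h2]
    · rw [blsVals]
      have h1 : ¬ lo < n - lo := by omega
      have h2 : lo = n - lo := by omega
      have hv : blsVal n (2 * lo - 1) = (lo : Int) := by
        simp only [blsVal]; split_ifs <;> push_cast <;> omega
      rw [dif_neg h1, if_pos h2, List.range'_succ]
      simp [hv]
    · rw [blsVals]
      have h1 : lo < n - lo := by omega
      have hv1 : blsVal n (2 * lo - 1) = (lo : Int) := by
        simp only [blsVal]; split_ifs <;> push_cast <;> omega
      have hv2 : blsVal n (2 * lo) = ((n - lo : Nat) : Int) := by
        simp only [blsVal]; split_ifs <;> push_cast <;> omega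
      have e1 : 2 * lo - 1 + 1 = 2 * lo := by omega
      have e2 : 2 * lo + 1 = 2 * (lo + 1) - 1 := by omega
      have hr : List.range' (2 * lo - 1) (m + 2) =
          (2 * lo - 1) :: (2 * lo) :: List.range' (2 * (lo + 1) - 1) m := by
        rw [List.range'_succ, e1, List.range'_succ, e2]
      rw [hr]
      have hrec := ih m (by omega) (lo + 1) (by omega) (by omega)
      have hsub : n - (lo + 1) = n - lo - 1 := by omega
      rw [hsub] at hrec
      rw [dif_pos h1]
      simp only [List.map_cons, hv1, hv2, hrec]

-- ===== VERDICT (by name: the statement is the Claim_ definition above) =====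
theorem balanced_latin_square_spec : Claim_equal_balanced_latin_square := by
  intro array participant_id _
  unfold Spec_balanced_latin_square balanced_latin_square balanced_latin_square_alt
  have h0 : blsJ 0 = 0 := by simp [blsJ]
  have key := bls_fold_inv array.length array participant_id array.length 0 []
  rw [h0] at key
  simp only [Int.sub_zero, Nat.cast_zero, List.nil_append, ← List.range_eq_range'] at key
  have hvals : (List.range array.length).map (blsVal array.length)
      = (if array.length = 0 then [] else (0 : Int) :: blsVals 1 (array.length - 1)) := by
    rcases hn : array.length with _ | k
    · simp
    · have hr : List.range (k + 1) = 0 :: List.range' 1 k := by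
        rw [List.range_eq_range', List.range'_succ]
      rw [hr]
      have h2 := bls_two_ptr (k + 1) k 1 (by omega) (by omega)
      have h21 : 2 * 1 - 1 = 1 := by omega
      rw [h21] at h2
      simp only [Nat.add_sub_cancel] at h2 ⊢
      simp [blsVal, h2]
  have hmap := congrArg (List.map
      (fun v => (PySem.List.pyGet? array (PySem.Int.mod (v + participant_id) (array.length : Int))).getD 0)) hvals
  rw [List.map_map] at hmap
  have hmap2 : (List.range array.length).map
      (fun k => (PySem.List.pyGet? array (PySem.Int.mod (blsVal array.length k + participant_id) (array.length : Int))).getD 0)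
      = (if array.length = 0 then ([] : List Int) else (0 : Int) :: blsVals 1 (array.length - 1)).map
      (fun v => (PySem.List.pyGet? array (PySem.Int.mod (v + participant_id) (array.length : Int))).getD 0) := hmap
  show (if array.length % 2 ≠ 0 ∧ PySem.Int.mod participant_id 2 ≠ 0 then
      ((List.range array.length).foldl (blsStep array.length array participant_id) ([], 0, 0)).1.reverse
    else ((List.range array.length).foldl (blsStep array.length array participant_id) ([], 0, 0)).1)
    = (if array.length % 2 ≠ 0 ∧ PySem.Int.mod participant_id 2 ≠ 0 then
      ((if array.length = 0 then ([] : List Int) else (0 : Int) :: blsVals 1 (array.length - 1)).map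
        (fun v => (PySem.List.pyGet? array (PySem.Int.mod (v + participant_id) (array.length : Int))).getD 0)).reverse
    else (if array.length = 0 then ([] : List Int) else (0 : Int) :: blsVals 1 (array.length - 1)).map
        (fun v => (PySem.List.pyGet? array (PySem.Int.mod (v + participant_id) (array.length : Int))).getD 0))
  rw [key, hmap2]
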